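-- pv_equiv track=rewrite | github.com/AC-Polymer-SDL-4/actuator-dispenser | analyze_color_matching_results.py | _longest_consecutive_streak
-- ===== SOURCE A (Python) =====
-- def _longest_consecutive_streak(wells):
--     if not wells:
--         return 0
--     longest = 1
--     current = 1
--     for prev, curr in zip(wells, wells[1:]):
--         if curr == prev + 1:
--             current += 1
--             longest = max(longest, current)
--         else:
--             current = 1
--     return longest
-- ===== SOURCE B (Python) =====
-- def _longest_consecutive_streak(wells):
--     if not wells:
--         return 0
--     # derived boolean sequence: flags[i] = wells[i+1] == wells[i] + 1
--     flags = [b == a + 1 for a, b in zip(wells, wells[1:])]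
--     # longest maximal run of True in flags, by skipping/measuring runs
--     best = 0
--     i = 0
--     n = len(flags)
--     while i < n:
--         if flags[i]:
--             j = i
--             while j < n and flags[j]:
--                 j += 1
--             best = max(best, j - i)
--             i = j
--         else:
--             i += 1
--     return best + 1
-- ===== Notes on version B (the rewrite author's own statement) =====
-- stated objective: alternative
-- what changed: B first materialises the adjacency flags (wells[i+1]==wells[i]+1) as a derived boolean list and then measures the longest maximal run of True by run-skipping, instead of A's single streaming fold carrying (longest, current) counters; streak = longest run + 1.
import Mathlib
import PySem

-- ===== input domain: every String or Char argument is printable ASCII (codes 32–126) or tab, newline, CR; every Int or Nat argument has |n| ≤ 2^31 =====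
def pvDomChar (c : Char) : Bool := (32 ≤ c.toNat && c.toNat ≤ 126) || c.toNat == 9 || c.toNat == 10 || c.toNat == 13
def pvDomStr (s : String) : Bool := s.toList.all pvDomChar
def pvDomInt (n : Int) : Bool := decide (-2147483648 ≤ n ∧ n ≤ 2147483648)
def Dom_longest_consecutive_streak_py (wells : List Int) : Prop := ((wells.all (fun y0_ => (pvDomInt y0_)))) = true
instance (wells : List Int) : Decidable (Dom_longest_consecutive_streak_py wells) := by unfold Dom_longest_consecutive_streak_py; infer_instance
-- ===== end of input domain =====

-- B differs from A only in decomposition (derived flag list + run scan vs one streaming fold); same values everywhere.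

-- ===== PORT A =====
-- A: single fold over adjacent pairs carrying (longest, current)
def longest_consecutive_streak_py (wells : List Int) : Int :=
  if wells = [] then 0
  else
    ((wells.zip wells.tail).foldl
      (fun (s : Int × Int) (pc : Int × Int) =>
        if pc.2 = pc.1 + 1 then (max s.1 (s.2 + 1), s.2 + 1) else (s.1, 1))
      (1, 1)).1

-- ===== PORT B =====
-- length of the leading run of True (Source B's inner `while j < n and flags[j]` measuring j - i)
def pvLeadTrue (fs : List Bool) : Int := ((fs.takeWhile id).length : Int)

-- longest maximal run of True: skip False, measure a True run, jump past it (Source B's outer while loop)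
def pvMaxRun : List Bool → Int
  | [] => 0
  | false :: r => pvMaxRun r
  | true :: r => max (1 + pvLeadTrue r) (pvMaxRun (r.dropWhile id))
termination_by fs => fs.length
decreasing_by
  · simp
  · exact Nat.lt_succ_of_le (List.length_dropWhile_le _ _)

def longest_consecutive_streak_py_alt (wells : List Int) : Int :=
  if wells = [] then 0
  else pvMaxRun (List.zipWith (fun a b => decide (b = a + 1)) wells wells.tail) + 1

-- ===== PRECONDITION & SPEC =====
def Spec_longest_consecutive_streak_py (wells : List Int) (out : Int) : Prop := out = longest_consecutive_streak_py_alt wells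
instance (wells : List Int) (out : Int) : Decidable (Spec_longest_consecutive_streak_py wells out) := by unfold Spec_longest_consecutive_streak_py; infer_instance

-- ===== CLAIM (what is proved, stated in full; the proofs are below) =====
def Claim_equal_longest_consecutive_streak_py : Prop := ∀ (wells : List Int), Dom_longest_consecutive_streak_py wells → Spec_longest_consecutive_streak_py wells (longest_consecutive_streak_py wells)

-- ===== LEMMAS AND PROOFS =====

-- A's fold step, re-expressed over the boolean flag of a pair
def pvStep (s : Int × Int) (f : Bool) : Int × Int :=
  if f then (max s.1 (s.2 + 1), s.2 + 1) else (s.1, 1)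

-- the first component of A's fold, as a recursion over the flags
def pvM (c : Int) : List Bool → Int
  | [] => c
  | true :: r => pvM (c + 1) r
  | false :: r => max c (pvM 1 r)

lemma fold_pairs_eq_flags (a b : List Int) (s : Int × Int) :
    (a.zip b).foldl
      (fun (s : Int × Int) (pc : Int × Int) =>
        if pc.2 = pc.1 + 1 then (max s.1 (s.2 + 1), s.2 + 1) else (s.1, 1)) s
    = (List.zipWith (fun x y => decide (y = x + 1)) a b).foldl pvStep s := by
  induction a generalizing b s with
  | nil => simp
  | cons x a ih =>
    cases b with
    | nil => simp
    | cons y b =>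
      simp only [List.zip_cons_cons, List.zipWith_cons_cons, List.foldl_cons, pvStep]
      by_cases h : y = x + 1 <;> simp [h, ih]

lemma pvMaxRun_nonneg (fs : List Bool) : 0 ≤ pvMaxRun fs := by
  induction fs using pvMaxRun.induct with
  | case1 => simp [pvMaxRun]
  | case2 r ih => simpa [pvMaxRun] using ih
  | case3 r ih =>
    have : (0:Int) ≤ 1 + pvLeadTrue r := by
      have : (0:Int) ≤ pvLeadTrue r := by simp [pvLeadTrue]
      omega
    simp [pvMaxRun]
    omega

lemma pvMaxRun_eq (fs : List Bool) :
    pvMaxRun fs = max (pvLeadTrue fs) (pvMaxRun (fs.dropWhile id)) := by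
  cases fs with
  | nil => simp [pvMaxRun, pvLeadTrue]
  | cons f r =>
    cases f with
    | true =>
      simp [pvMaxRun, pvLeadTrue, List.takeWhile, List.dropWhile]
      omega
    | false =>
      have h := pvMaxRun_nonneg (false :: r)
      simp [pvMaxRun, pvLeadTrue, List.takeWhile, List.dropWhile] at h ⊢
      omega

lemma pvM_eq (fs : List Bool) : ∀ c : Int, 1 ≤ c →
    pvM c fs = max (c + pvLeadTrue fs) (1 + pvMaxRun (fs.dropWhile id)) := by
  induction fs with
  | nil => intro c hc; simp [pvM, pvLeadTrue, pvMaxRun]; omega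
  | cons f r ih =>
    intro c hc
    cases f with
    | true =>
      have := ih (c + 1) (by omega)
      simp [pvM, pvLeadTrue, List.takeWhile, List.dropWhile] at this ⊢
      omega
    | false =>
      have h1 := ih 1 (by norm_num)
      have h2 := pvMaxRun_eq r
      have h3 : pvMaxRun (false :: r) = pvMaxRun r := by simp [pvMaxRun]
      simp [pvM, pvLeadTrue, List.takeWhile, List.dropWhile] at h1 h2 ⊢
      omega

lemma pvM_one (fs : List Bool) : pvM 1 fs = 1 + pvMaxRun fs := by
  have h := pvM_eq fs 1 (by norm_num)
  have h2 := pvMaxRun_eq fs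
  omega

lemma pvM_ge (fs : List Bool) : ∀ c : Int, c ≤ pvM c fs := by
  induction fs with
  | nil => intro c; simp [pvM]
  | cons f r ih =>
    intro c
    cases f with
    | true =>
      have := ih (c + 1)
      simp [pvM] at this ⊢
      omega
    | false => simp [pvM]

lemma fold_step_fst (fs : List Bool) : ∀ l c : Int, 1 ≤ c → c ≤ l →
    (fs.foldl pvStep (l, c)).1 = max l (pvM c fs) := by
  induction fs with
  | nil => intro l c h1 h2; simp [pvM]; omega
  | cons f r ih =>
    intro l c h1 h2
    cases f with
    | true =>
      have := ih (max l (c + 1)) (c + 1) (by omega) (by omega)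
      have hm : c + 1 ≤ pvM (c + 1) r := pvM_ge r (c + 1)
      simp [pvStep, pvM] at this ⊢
      omega
    | false =>
      have := ih l 1 (by norm_num) (by omega)
      simp [pvStep, pvM] at this ⊢
      omega

-- ===== VERDICT (by name: the statement is the Claim_ definition above) =====
theorem longest_consecutive_streak_py_spec : Claim_equal_longest_consecutive_streak_py := by
  intro wells _
  unfold Spec_longest_consecutive_streak_py longest_consecutive_streak_py longest_consecutive_streak_py_alt
  by_cases h : wells = []
  · simp [h]
  · simp only [h, if_false]
    rw [fold_pairs_eq_flags]
    have := fold_step_fst (List.zipWith (fun x y => decide (y = x + 1)) wells wells.tail)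
      1 1 (by norm_num) (by norm_num)
    rw [this, pvM_one]
    have := pvMaxRun_nonneg (List.zipWith (fun x y => decide (y = x + 1)) wells wells.tail)
    omega
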